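-- pv_equiv track=rewrite | github.com/minyou73/algo | programmers/Level1/없는숫자더하기/sol.py | solution
-- ===== SOURCE A (Python) =====
-- def solution(numbers):
--     num = [i for i in range(10)]  # num = list[range(10)]
--     numbers = sorted(numbers)
--     answer = []
--
--     for i in num:
--         if i not in numbers:
--             answer.append(i)
--
--     return sum(answer)
-- ===== SOURCE B (Python) =====
-- def solution(numbers):
--     present = {x for x in numbers if 0 <= x <= 9}
--     return 45 - sum(present)
-- ===== Notes on version B (the rewrite author's own statement) =====
-- stated objective: faster
-- what changed: Replaces sort-then-scan over range(10) with membership tests by one pass collecting the distinct digits present and subtracting their sum from 45.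
import Mathlib
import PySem

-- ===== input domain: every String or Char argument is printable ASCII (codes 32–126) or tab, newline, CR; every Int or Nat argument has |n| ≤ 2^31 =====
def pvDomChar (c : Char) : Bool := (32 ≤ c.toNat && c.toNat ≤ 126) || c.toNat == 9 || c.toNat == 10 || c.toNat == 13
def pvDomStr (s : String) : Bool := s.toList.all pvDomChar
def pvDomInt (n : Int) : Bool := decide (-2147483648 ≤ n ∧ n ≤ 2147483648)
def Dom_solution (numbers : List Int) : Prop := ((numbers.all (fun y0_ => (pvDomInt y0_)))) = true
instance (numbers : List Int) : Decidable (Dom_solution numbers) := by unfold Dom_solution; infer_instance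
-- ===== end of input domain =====

-- B drops the sort and the per-digit membership scans: one pass collects the distinct digits present and returns 45 minus their sum (faster).

-- ===== PORT A =====
def solution (numbers : List Int) : Int :=
  let num : List Int := PySem.List.pyRange 0 10 1
  let numbers' : List Int := PySem.List.sorted numbers (fun x => x) false
  let answer : List Int := num.foldl (fun acc i => if i ∈ numbers' then acc else acc ++ [i]) []
  answer.sum

-- ===== PORT B =====
def solution_alt (numbers : List Int) : Int :=
  let present : PySem.Set Int := PySem.Set.ofList (numbers.filter (fun x => 0 ≤ x && x ≤ 9))
  45 - present.sum

-- ===== PRECONDITION & SPEC =====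
def Spec_solution (numbers : List Int) (out : Int) : Prop := out = solution_alt numbers
instance (numbers : List Int) (out : Int) : Decidable (Spec_solution numbers out) := by unfold Spec_solution; infer_instance

-- ===== CLAIM (what is proved, stated in full; the proofs are below) =====
def Claim_equal_solution : Prop := ∀ (numbers : List Int), Dom_solution numbers → Spec_solution numbers (solution numbers)

-- ===== LEMMAS AND PROOFS =====

-- splitting a sum by a predicate (shape with `decide ¬ ·`, as A's loop leaves it)
lemma sum_split (l : List Int) (p : Int → Prop) [DecidablePred p] :
    (l.filter (fun x => decide (p x))).sum + (l.filter (fun x => decide (¬ p x))).sum = l.sum := by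
  simp only [decide_not]
  induction l with
  | nil => simp
  | cons a t ih => by_cases h : p a <;> simp [h] <;> omega

-- the distinct digits of `numbers` (B's set) are a permutation of the present digits of 0..9 (A's complement)
lemma present_perm (numbers : List Int) :
    (PySem.Set.ofList (numbers.filter (fun x => 0 ≤ x && x ≤ 9)) : List Int).Perm
      ((PySem.List.pyRange 0 10 1).filter (fun i => decide (i ∈ numbers))) := by
  rw [List.perm_ext_iff_of_nodup (PySem.Set.nodup_ofList _)
        ((PySem.List.nodup_pyRange_one 0 10).filter _)]
  intro x
  simp [PySem.Set.mem_ofList, List.mem_filter, PySem.List.mem_pyRange_one]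
  constructor
  · rintro ⟨hx, h0, h9⟩; exact ⟨⟨h0, by omega⟩, hx⟩
  · rintro ⟨⟨h0, h10⟩, hx⟩; exact ⟨hx, h0, by omega⟩

-- ===== VERDICT (by name: the statement is the Claim_ definition above) =====
theorem solution_spec : Claim_equal_solution := by
  intro numbers _
  unfold Spec_solution solution solution_alt
  dsimp only
  have hflip : (fun (acc : List Int) (i : Int) =>
      if i ∈ PySem.List.sorted numbers (fun x => x) false then acc else acc ++ [i])
      = (fun acc i => if ¬ i ∈ PySem.List.sorted numbers (fun x => x) false then acc ++ [i] else acc) := by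
    funext acc i; exact (ite_not _ _ _).symm
  rw [hflip, PySem.List.foldl_append_ite_eq_filter]
  have hmem : ∀ i : Int,
      (i ∈ PySem.List.sorted numbers (fun x => x) false) ↔ i ∈ numbers := by
    intro i; simp [PySem.List.mem_sorted]
  have hfilter :
      (PySem.List.pyRange 0 10 1).filter (fun i => decide ¬ i ∈ PySem.List.sorted numbers (fun x => x) false)
        = (PySem.List.pyRange 0 10 1).filter (fun i => decide ¬ i ∈ numbers) := by
    apply List.filter_congr; intro i _; simp [hmem]
  have hsum := (present_perm numbers).sum_eq
  have hsplit :
      ((PySem.List.pyRange 0 10 1).filter (fun i => decide (i ∈ numbers))).sum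
        + ((PySem.List.pyRange 0 10 1).filter (fun i => decide ¬ i ∈ numbers)).sum
        = (PySem.List.pyRange 0 10 1).sum := by
    exact sum_split _ _
  have h45 : (PySem.List.pyRange 0 10 1).sum = 45 := by decide
  simp only [hfilter, List.nil_append]
  rw [hsum]
  omega
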